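-- pv_equiv track=rewrite | github.com/andrewprzh/ngs-analysis | barcode_detection/common.py | find_polyt_start
-- ===== SOURCE A (Python) =====
-- window_size = 16
--
-- polyA_count = int(window_size * 0.75)
--
-- def find_polyt_start(seq):
--     if len(seq) < window_size:
--         return -1
--     i = 0
--     a_count = seq[0:window_size].count('T')
--     while i < len(seq) - window_size:
--         if a_count >= polyA_count:
--             break
--         first_base_a = seq[i] == 'T'
--         new_base_a = i + window_size < len(seq) and seq[i + window_size] == 'T'
--         if first_base_a and not new_base_a:
--             a_count -= 1
--         elif not first_base_a and new_base_a:
--             a_count += 1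
--         i += 1
--
--     if i >= len(seq) - window_size:
--         return -1
--
--     return i + max(0, seq[i:].find('TT'))
-- ===== SOURCE B (Python) =====
-- window_size = 16
--
-- polyA_count = int(window_size * 0.75)
--
-- def find_polyt_start(seq):
--     if len(seq) < window_size:
--         return -1
--     prefix = [0]
--     for ch in seq:
--         prefix.append(prefix[-1] + (ch == 'T'))
--     for i in range(len(seq) - window_size):
--         if prefix[i + window_size] - prefix[i] >= polyA_count:
--             return i + max(0, seq[i:].find('TT'))
--     return -1
-- ===== Notes on version B (the rewrite author's own statement) =====
-- stated objective: alternative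
-- what changed: Replaces the incrementally-maintained sliding window count (single while loop mutating i and a_count) with a precomputed prefix-count table and a separate scan that tests each window by one subtraction of two prefix entries.
import Mathlib
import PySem

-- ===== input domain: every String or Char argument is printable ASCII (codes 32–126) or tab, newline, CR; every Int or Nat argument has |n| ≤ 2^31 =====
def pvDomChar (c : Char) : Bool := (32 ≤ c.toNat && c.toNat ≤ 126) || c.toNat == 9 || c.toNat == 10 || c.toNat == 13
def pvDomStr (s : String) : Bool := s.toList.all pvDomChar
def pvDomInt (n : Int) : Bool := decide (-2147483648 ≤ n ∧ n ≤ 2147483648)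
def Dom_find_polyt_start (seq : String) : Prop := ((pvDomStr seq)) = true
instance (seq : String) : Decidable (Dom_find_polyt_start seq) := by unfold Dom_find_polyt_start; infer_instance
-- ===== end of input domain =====

-- B replaces A's incrementally-maintained sliding window count with a prefix-count table and a
-- separate scan (alternative decomposition, same asymptotic cost).


set_option maxHeartbeats 1000000

-- ===== PORT A =====
-- the 'while i < len(seq) - window_size' loop of A, carried state (i, a_count)
def find_polyt_start_loop (s : List Char) (i : Nat) (a_count : Int) : Nat × Int :=
  if _h : i < s.length - 16 then
    if a_count ≥ 12 then (i, a_count)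
    else
      let first_base_a := PySem.List.pyGet? s (i : Int) == some 'T'
      let new_base_a := decide (i + 16 < s.length) && (PySem.List.pyGet? s ((i : Int) + 16) == some 'T')
      let a_count' :=
        if first_base_a && !new_base_a then a_count - 1
        else if !first_base_a && new_base_a then a_count + 1
        else a_count
      find_polyt_start_loop s (i + 1) a_count'
  else (i, a_count)
termination_by s.length - 16 - i

def find_polyt_start (seq : String) : Int :=
  let s := seq.toList
  if s.length < 16 then -1
  else
    let a0 : Int := (PySem.Chars.count (PySem.List.slice s (some 0) (some 16)) ['T'] : Int)
    let r := find_polyt_start_loop s 0 a0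
    if r.1 ≥ s.length - 16 then -1
    else (r.1 : Int) + max 0 (PySem.Chars.find (PySem.List.slice s (some (r.1 : Int)) none) ['T', 'T'])

-- ===== PORT B =====
-- prefix = [0]; for ch in seq: prefix.append(prefix[-1] + (ch == 'T'))
def alt_prefix (s : List Char) : List Int :=
  s.foldl (fun p ch => p ++ [p.getLastD 0 + (if ch == 'T' then 1 else 0)]) [0]

-- for i in range(len(seq) - window_size): if prefix[i+16]-prefix[i] >= 12: return …
def alt_scan (s : List Char) (pre : List Int) (i : Nat) : Int :=
  if _h : i < s.length - 16 then
    if PySem.List.pyGetD pre ((i : Int) + 16) 0 - PySem.List.pyGetD pre (i : Int) 0 ≥ 12 then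
      (i : Int) + max 0 (PySem.Chars.find (PySem.List.slice s (some (i : Int)) none) ['T', 'T'])
    else alt_scan s pre (i + 1)
  else -1
termination_by s.length - 16 - i

def find_polyt_start_alt (seq : String) : Int :=
  let s := seq.toList
  if s.length < 16 then -1
  else alt_scan s (alt_prefix s) 0

-- ===== PRECONDITION & SPEC =====
def Spec_find_polyt_start (seq : String) (out : Int) : Prop := out = find_polyt_start_alt seq
instance (seq : String) (out : Int) : Decidable (Spec_find_polyt_start seq out) := by unfold Spec_find_polyt_start; infer_instance

-- ===== CLAIM (what is proved, stated in full; the proofs are below) =====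
def Claim_equal_find_polyt_start : Prop := ∀ (seq : String), Dom_find_polyt_start seq → Spec_find_polyt_start seq (find_polyt_start seq)

-- ===== LEMMAS AND PROOFS =====

-- s.count('T'): a single-character needle counts the element occurrences
theorem chars_count_go_single (c : Char) (fuel : Nat) (l : List Char) (acc : Nat) :
    PySem.Chars.count.go [c] fuel l acc = acc + ((l.take fuel).count c) := by
  induction fuel generalizing l acc with
  | zero => simp [PySem.Chars.count.go]
  | succ n ih =>
      cases l with
      | nil => simp [PySem.Chars.count.go]
      | cons h t =>
          rw [PySem.Chars.count.go]
          by_cases hc : h = c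
          · simp [hc, List.isPrefixOf, ih]
            omega
          · have hp : ([c].isPrefixOf (h :: t)) = false := by
              simp [List.isPrefixOf]
              exact fun he => absurd he.symm hc
            simp [hp, ih, hc]

theorem chars_count_single (cs : List Char) (c : Char) :
    PySem.Chars.count cs [c] = cs.count c := by
  simp [PySem.Chars.count, chars_count_go_single]

-- the count of 'T' in the 16-wide window starting at i
def wc (s : List Char) (i : Nat) : Nat := ((s.drop i).take 16).count 'T'

theorem alt_prefix_concat (s : List Char) (c : Char) :
    alt_prefix (s ++ [c])
      = alt_prefix s ++ [(alt_prefix s).getLastD 0 + (if c == 'T' then 1 else 0)] := by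
  simp [alt_prefix, List.foldl_append]

theorem alt_prefix_len (s : List Char) : (alt_prefix s).length = s.length + 1 := by
  induction s using List.reverseRecOn with
  | nil => simp [alt_prefix]
  | append_singleton t c ih => simp [alt_prefix_concat, ih]

theorem getLastD_eq_getD (l : List Int) : l.getLastD 0 = l.getD (l.length - 1) 0 := by
  cases l with
  | nil => simp
  | cons a t => simp [List.getLastD_eq_getLast?, List.getLast?_eq_getElem?, List.getD_eq_getElem?_getD]

theorem alt_prefix_getD (s : List Char) (j : Nat) (hj : j ≤ s.length) :
    (alt_prefix s).getD j 0 = ((s.take j).count 'T' : Int) := by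
  induction s using List.reverseRecOn generalizing j with
  | nil => simp at hj; simp [alt_prefix, hj]
  | append_singleton t c ih =>
      rw [alt_prefix_concat]
      rcases Nat.lt_or_ge j (t.length + 1) with hlt | hge
      · have hjt : j ≤ t.length := by omega
        rw [List.getD_append _ _ _ _ (by rw [alt_prefix_len]; omega)]
        rw [ih j hjt, List.take_append_of_le_length hjt]
      · have hj' : j = t.length + 1 := by simp at hj; omega
        subst hj'
        have hlast : (alt_prefix t).getLastD 0 = ((t.count 'T') : Int) := by
          rw [getLastD_eq_getD, alt_prefix_len]
          simpa using ih t.length le_rfl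
        rw [List.getD_append_right _ _ _ _ (by rw [alt_prefix_len])]
        rw [alt_prefix_len, hlast]
        have h0 : t.length + 1 - (t.length + 1) = 0 := by omega
        rw [h0]
        have htk : List.take (t.length + 1) (t ++ [c]) = t ++ [c] :=
          List.take_of_length_le (by simp)
        rw [htk]
        by_cases hc : c = 'T' <;> simp [hc, List.count_append]

theorem prefix_diff (s : List Char) (i : Nat) (h : i + 16 ≤ s.length) :
    (alt_prefix s).getD (i + 16) 0 - (alt_prefix s).getD i 0 = (wc s i : Int) := by
  rw [alt_prefix_getD s (i+16) h, alt_prefix_getD s i (by omega)]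
  have : List.take (i + 16) s = List.take i s ++ (List.drop i s).take 16 := by
    rw [← List.take_add]
  rw [this, List.count_append, wc]
  push_cast; ring

theorem wc_shift (s : List Char) (i : Nat) (h : i + 16 < s.length) :
    (wc s (i + 1) : Int)
      = (wc s i : Int) - (if s[i]'(by omega) = 'T' then 1 else 0)
          + (if s[i + 16]'(by omega) = 'T' then 1 else 0) := by
  have hd : s.drop i = s[i]'(by omega) :: s.drop (i+1) := by
    rw [List.drop_eq_getElem_cons (by omega)]
  have ht : (s.drop (i+1)).take 16 = (s.drop (i+1)).take 15 ++ [s[i+16]'(by omega)] := by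
    have h15 : (15:Nat) + 1 = 16 := rfl
    conv_lhs => rw [← h15, List.take_add_one]
    have h? : (s.drop (i+1))[15]? = some (s[i+16]'(by omega)) := by
      rw [List.getElem?_drop]
      conv_lhs => rw [show i+1+15 = i+16 from by omega]
      exact List.getElem?_eq_getElem (by omega)
    simp [h?]
  have hw1 : wc s (i+1) = ((s.drop (i+1)).take 15).count 'T'
      + (if s[i+16]'(by omega) = 'T' then 1 else 0) := by
    rw [wc, ht, List.count_append]
    by_cases hc : s[i+16]'(by omega) = 'T' <;> simp [hc]
  have hw0 : wc s i = (if s[i]'(by omega) = 'T' then 1 else 0)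
      + ((s.drop (i+1)).take 15).count 'T' := by
    rw [wc, hd]
    rw [show (16:Nat) = 15 + 1 from rfl, List.take_succ_cons, List.count_cons]
    by_cases hc : s[i]'(by omega) = 'T'
    · simp [hc]
      omega
    · simp [hc]
  rw [hw1, hw0]
  push_cast
  ring

-- A's loop followed by A's final guard/return equals B's scan, given the window-count invariant
theorem loop_stop (s : List Char) (i : Nat) (acc : Int)
    (hlt : i < s.length - 16) (hb : acc ≥ 12) :
    find_polyt_start_loop s i acc = (i, acc) := by
  rw [find_polyt_start_loop.eq_def, dif_pos hlt, if_pos hb]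

theorem loop_step (s : List Char) (i : Nat) (acc : Int)
    (hlt : i < s.length - 16) (h16 : i + 16 < s.length) (hb : ¬ acc ≥ 12)
    (hacc : acc = (wc s i : Int)) :
    find_polyt_start_loop s i acc = find_polyt_start_loop s (i + 1) ((wc s (i + 1) : Nat) : Int) := by
  have hg0 : PySem.List.pyGet? s (i : Int) = some (s[i]'(by omega)) := by
    rw [PySem.List.pyGet?_natCast]
    exact List.getElem?_eq_getElem (by omega)
  have hg1 : PySem.List.pyGet? s ((i : Int) + 16) = some (s[i+16]'(by omega)) := by
    have hcast : ((i : Int) + 16) = (((i + 16 : Nat)) : Int) := by push_cast; ring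
    rw [hcast, PySem.List.pyGet?_natCast]
    exact List.getElem?_eq_getElem (by omega)
  rw [find_polyt_start_loop.eq_def, dif_pos hlt, if_neg hb]
  simp only [hg0, hg1, decide_eq_true h16, Bool.true_and]
  congr 1
  rw [wc_shift s i h16, ← hacc]
  by_cases h0 : s[i]'(by omega) = 'T' <;> by_cases h1 : s[i+16]'(by omega) = 'T' <;>
    simp [h0, h1]

theorem loop_eq (s : List Char) (hlen : 16 ≤ s.length) (i : Nat) (acc : Int)
    (hacc : acc = (wc s i : Int)) :
    (if (find_polyt_start_loop s i acc).1 ≥ s.length - 16 then (-1 : Int)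
     else ((find_polyt_start_loop s i acc).1 : Int)
            + max 0 (PySem.Chars.find
                (PySem.List.slice s (some (((find_polyt_start_loop s i acc).1 : Nat) : Int)) none) ['T', 'T']))
      = alt_scan s (alt_prefix s) i := by
  generalize hn : s.length - 16 - i = n
  induction n generalizing i acc with
  | zero =>
      have hge : ¬ i < s.length - 16 := by omega
      have hstop : find_polyt_start_loop s i acc = (i, acc) := by
        rw [find_polyt_start_loop.eq_def, dif_neg hge]
      rw [hstop, alt_scan.eq_def, dif_neg hge]
      exact if_pos (by omega)
  | succ n ih =>
      have hlt : i < s.length - 16 := by omega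
      have h16 : i + 16 < s.length := by omega
      have htest : PySem.List.pyGetD (alt_prefix s) ((i : Int) + 16) 0
          - PySem.List.pyGetD (alt_prefix s) (i : Int) 0 = acc := by
        have hcast : ((i : Int) + 16) = (((i + 16 : Nat)) : Int) := by push_cast; ring
        rw [hcast, PySem.List.pyGetD_natCast, PySem.List.pyGetD_natCast, hacc]
        exact prefix_diff s i (by omega)
      rw [alt_scan.eq_def, dif_pos hlt, htest]
      by_cases hb : acc ≥ 12
      · rw [if_pos hb, loop_stop s i acc hlt hb]
        have hc : ¬ ((i, acc).1 ≥ s.length - 16) := by simp; omega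
        rw [if_neg hc]
      · rw [if_neg hb, loop_step s i acc hlt h16 hb hacc]
        exact ih (i+1) _ rfl (by omega)

-- ===== VERDICT (by name: the statement is the Claim_ definition above) =====
theorem find_polyt_start_spec : Claim_equal_find_polyt_start := by
  intro seq _
  show find_polyt_start seq = find_polyt_start_alt seq
  simp only [find_polyt_start, find_polyt_start_alt]
  by_cases h : seq.toList.length < 16
  · rw [if_pos h, if_pos h]
  · rw [if_neg h, if_neg h]
    have h16 : 16 ≤ seq.toList.length := by omega
    have ha0 : (PySem.Chars.count (PySem.List.slice seq.toList (some 0) (some 16)) ['T'] : Int)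
        = (wc seq.toList 0 : Int) := by
      rw [chars_count_single]
      congr 1
      rw [wc]
      have : PySem.List.slice seq.toList (some 0) (some 16) = seq.toList.take 16 := by
        rw [PySem.List.slice_zero_start]
        exact_mod_cast PySem.List.slice_to_natCast seq.toList 16
      rw [this, List.drop_zero]
    rw [ha0]
    exact loop_eq seq.toList h16 0 _ rfl
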